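-- pv_equiv track=rewrite | github.com/swarley72/algorithms | heap/1962_remove_stones_minimize_total.py | min_stone_sum_floor
-- ===== SOURCE A (Python) =====
-- import heapq
-- import math
--
-- def min_stone_sum_floor(piles: list[int], k: int) -> int:
--     max_heap = [-s for s in piles]
--     heapq.heapify(max_heap)
--
--     for _ in range(k):
--         stone = heapq.heappop(max_heap)
--         new_stones = math.floor(stone / 2)
--         heapq.heappush(max_heap, new_stones)
--
--     return -sum(max_heap)
-- ===== SOURCE B (Python) =====
-- def min_stone_sum_floor(piles: list[int], k: int) -> int:
--     vals = list(piles)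
--     total = sum(vals)
--     for _ in range(k):
--         m = max(vals)
--         i = vals.index(m)
--         vals[i] = (m + 1) // 2
--         total -= m // 2
--     return total
-- ===== Notes on version B (the rewrite author's own statement) =====
-- stated objective: simpler
-- what changed: Replaces the negated max-heap and float floor-division by a plain list with an in-place update: each round finds the maximum by a linear scan, overwrites it at its index with its ceiling half (m+1)//2, and maintains a running total decremented by m//2 instead of summing at the end.
-- outside the precondition, e.g. on min_stone_sum_floor([], 1): A raises IndexError, B raises ValueError
import Mathlib
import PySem

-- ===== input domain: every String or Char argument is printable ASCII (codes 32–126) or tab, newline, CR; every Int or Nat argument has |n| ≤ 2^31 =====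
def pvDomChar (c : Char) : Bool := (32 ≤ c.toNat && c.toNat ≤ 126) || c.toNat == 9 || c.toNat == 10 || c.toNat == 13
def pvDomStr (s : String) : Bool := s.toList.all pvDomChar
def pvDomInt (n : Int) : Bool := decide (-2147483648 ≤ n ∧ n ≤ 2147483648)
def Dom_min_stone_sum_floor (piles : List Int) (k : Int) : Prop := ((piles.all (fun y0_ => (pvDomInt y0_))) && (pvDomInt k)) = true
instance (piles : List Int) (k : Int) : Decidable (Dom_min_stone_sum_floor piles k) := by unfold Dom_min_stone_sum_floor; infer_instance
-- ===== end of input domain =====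

-- B replaces A's negated max-heap + float floor division by an in-place list update (overwrite
-- the maximum at its index with its ceiling half) plus a running total; objective: simpler.

-- ===== PORT A =====
-- heapq is modelled by its multiset semantics: heappop returns the minimum element of the
-- heap (exact: the popped VALUE and the final sum depend only on the heap's multiset, never
-- on its internal array layout); heappush adds the element.  math.floor(stone / 2) equals
-- integer floor division, exact on Dom (|values| ≤ 2^31 < 2^53, float division is exact).
def pvHeapStep (h : List Int) : List Int :=
  match PySem.List.min? h (fun x => x) with
  | none => h            -- heap empty: Python raises IndexError here (excluded by Pre_)
  | some stone => PySem.Int.floordiv stone 2 :: h.erase stone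

def min_stone_sum_floor (piles : List Int) (k : Int) : Int :=
  let max_heap := piles.map (fun s => -s)
  let final := (PySem.List.pyRange 0 k 1).foldl (fun h _ => pvHeapStep h) max_heap;
  -final.sum

-- ===== PORT B =====
-- loop state is (vals, total); vals[i] = (m+1)//2 is List.set at the first index of the
-- maximum (PySem.List.index?); total -= m // 2 is the running-total update.
def pvAltStep (st : List Int × Int) : List Int × Int :=
  match PySem.List.max? st.1 (fun x => x) with
  | none => st           -- empty list: Python raises ValueError here (excluded by Pre_)
  | some m =>
    match PySem.List.index? st.1 m with
    | none => st         -- unreachable: the maximum is a member of the list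
    | some i => (st.1.set i (PySem.Int.floordiv (m + 1) 2), st.2 - PySem.Int.floordiv m 2)

def min_stone_sum_floor_alt (piles : List Int) (k : Int) : Int :=
  ((PySem.List.pyRange 0 k 1).foldl (fun st _ => pvAltStep st) (piles, piles.sum)).2

-- ===== PRECONDITION & SPEC =====
-- Pre_ excludes exactly the inputs where Python A raises: an empty pile list with k > 0
-- (heappop from an empty heap raises IndexError; B's max([]) raises ValueError there too).
def Pre_min_stone_sum_floor (piles : List Int) (k : Int) : Prop := piles ≠ [] ∨ k ≤ 0
instance (piles : List Int) (k : Int) : Decidable (Pre_min_stone_sum_floor piles k) := by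
  unfold Pre_min_stone_sum_floor; infer_instance

def pvWitness_min_stone_sum_floor : List Int × Int := ([5, 4, 9], 2)

def Spec_min_stone_sum_floor (piles : List Int) (k : Int) (out : Int) : Prop :=
  out = min_stone_sum_floor_alt piles k
instance (piles : List Int) (k : Int) (out : Int) : Decidable (Spec_min_stone_sum_floor piles k out) := by
  unfold Spec_min_stone_sum_floor; infer_instance

-- ===== CLAIM (what is proved, stated in full; the proofs are below) =====
def Claim_equal_min_stone_sum_floor : Prop := ∀ (piles : List Int) (k : Int), Dom_min_stone_sum_floor piles k → Pre_min_stone_sum_floor piles k → Spec_min_stone_sum_floor piles k (min_stone_sum_floor piles k)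

-- ===== LEMMAS AND PROOFS =====

-- a foldl that ignores the list elements is an iterate
theorem pv_foldl_const {α β : Type} (f : β → β) (l : List α) (init : β) :
    l.foldl (fun s _ => f s) init = f^[l.length] init := by
  induction l generalizing init with
  | nil => rfl
  | cons x xs ih => simp [List.foldl, ih, Function.iterate_succ_apply]

-- the loop invariant relating A's heap to B's (vals, total) state
def pvInv (h : List Int) (st : List Int × Int) : Prop :=
  (↑h : Multiset Int) = ↑(st.1.map (fun v => -v)) ∧ st.2 = st.1.sum

theorem pv_min?_isMin {xs : List Int} {m : Int}
    (h : PySem.List.min? xs (fun x => x) = some m) : ∀ y ∈ xs, m ≤ y := by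
  have := PySem.List.min?_isMin h
  simpa using this

theorem pv_half_add (m : Int) :
    PySem.Int.floordiv (m + 1) 2 + PySem.Int.floordiv m 2 = m := by
  rw [PySem.Int.floordiv_eq_ediv_of_pos (by norm_num : (0:Int) < 2),
      PySem.Int.floordiv_eq_ediv_of_pos (by norm_num : (0:Int) < 2)]
  omega

theorem pv_step_inv (h : List Int) (st : List Int × Int) (hinv : pvInv h st) :
    pvInv (pvHeapStep h) (pvAltStep st) := by
  obtain ⟨vals, total⟩ := st
  obtain ⟨hms, hsum⟩ := hinv
  simp only at hms hsum ⊢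
  have hperm : h.Perm (vals.map (fun v => -v)) := Multiset.coe_eq_coe.mp hms
  cases hv : PySem.List.max? vals (fun x => x) with
  | none =>
      have hvnil : vals = [] := (PySem.List.max?_eq_none_iff _ _).mp hv
      subst hvnil
      have hnil : h = [] := List.Perm.eq_nil (by simpa using hperm)
      subst hnil
      simp [pvHeapStep, pvAltStep, hv, PySem.List.min?, pvInv, hsum]
  | some m =>
      have hmmem : m ∈ vals := PySem.List.max?_mem hv
      have hmmax : ∀ y ∈ vals, y ≤ m := by
        have := PySem.List.max?_isMax hv; simpa using this
      obtain ⟨i, hi⟩ := Option.isSome_iff_exists.mp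
        ((PySem.List.index?_isSome_iff _ _).mpr hmmem)
      obtain ⟨pre, suf, hsplit, hlen, hpre⟩ := (PySem.List.index?_eq_some_iff _ _ _).mp hi
      -- A's heap pops -m
      have hmemh : (-m) ∈ h := hperm.mem_iff.mpr (List.mem_map_of_mem hmmem)
      cases hs : PySem.List.min? h (fun x => x) with
      | none =>
          have : h = [] := (PySem.List.min?_eq_none_iff _ _).mp hs
          simp [this] at hmemh
      | some s =>
          have hsmem : s ∈ h := PySem.List.min?_mem hs
          have hsmin : ∀ y ∈ h, s ≤ y := pv_min?_isMin hs
          have hsm : s = -m := by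
            have h1 : s ≤ -m := hsmin _ hmemh
            have h2 : -m ≤ s := by
              have : s ∈ vals.map (fun v => -v) := hperm.mem_iff.mp hsmem
              rcases List.mem_map.mp this with ⟨v, hv', rfl⟩
              have := hmmax v hv'
              omega
            omega
          subst hsm
          have harith : PySem.Int.floordiv (-m) 2 = -(PySem.Int.floordiv (m + 1) 2) := by
            rw [PySem.Int.floordiv_eq_ediv_of_pos (by norm_num : (0:Int) < 2),
                PySem.Int.floordiv_eq_ediv_of_pos (by norm_num : (0:Int) < 2)]
            omega
          set x := PySem.Int.floordiv (m + 1) 2 with hx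
          -- B's new vals: set at index i = pre.length replaces the m in the middle
          have hset : vals.set i x = pre ++ x :: suf := by
            rw [hsplit, ← hlen, List.set_append_right _ _ (le_refl _)]
            simp
          constructor
          · -- multiset part
            simp only [pvAltStep, hv, hi, pvHeapStep, hs]
            have hpermB : (vals.set i x).Perm (x :: vals.erase m) := by
              rw [hset, hsplit, List.erase_append_right _ hpre, List.erase_cons_head]
              exact List.perm_middle
            have hpermMap : ((vals.set i x).map (fun v => -v)).Perm
                (-x :: (vals.map (fun v => -v)).erase (-m)) := by
              have h1 := hpermB.map (fun v : Int => -v)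
              have heraseMap : (vals.erase m).map (fun v : Int => -v)
                  = (vals.map (fun v => -v)).erase (-m) := by
                have hinj : Function.Injective (fun v : Int => -v) := fun a b hab => by
                  simpa using hab
                simpa using (List.map_erase hinj (a := m) (l := vals))
              simpa [heraseMap] using h1
            refine Multiset.coe_eq_coe.mpr ?_
            rw [harith]
            exact ((hperm.erase (-m)).cons _).trans hpermMap.symm
          · -- running-total part
            simp only [pvAltStep, hv, hi]
            have hsumset : (vals.set i x).sum = vals.sum - m + x := by
              rw [hset, hsplit]
              simp [List.sum_append]
              ring
            have := pv_half_add m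
            rw [hsumset, hsum]
            omega

theorem pv_iter_inv (n : Nat) (h : List Int) (st : List Int × Int) (hinv : pvInv h st) :
    pvInv (pvHeapStep^[n] h) (pvAltStep^[n] st) := by
  induction n generalizing h st with
  | zero => simpa using hinv
  | succ n ih =>
      rw [Function.iterate_succ_apply, Function.iterate_succ_apply]
      exact ih _ _ (pv_step_inv h st hinv)

theorem pv_sum_neg (l : List Int) : (l.map (fun v => -v)).sum = -l.sum := by
  induction l with
  | nil => simp
  | cons x xs ih => simp [ih]; ring

-- ===== VERDICT (by name: the statement is the Claim_ definition above) =====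
theorem min_stone_sum_floor_spec : Claim_equal_min_stone_sum_floor := by
  intro piles k _ _
  unfold Spec_min_stone_sum_floor min_stone_sum_floor min_stone_sum_floor_alt
  simp only
  rw [pv_foldl_const (f := pvHeapStep), pv_foldl_const (f := pvAltStep)]
  obtain ⟨hms, hsum⟩ := pv_iter_inv (PySem.List.pyRange 0 k 1).length
      (piles.map fun s => -s) (piles, piles.sum) ⟨rfl, rfl⟩
  have hperm := Multiset.coe_eq_coe.mp hms
  have := hperm.sum_eq
  rw [pv_sum_neg] at this
  omega
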